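-- pv_equiv track=rewrite | github.com/pypi-data/pypi-mirror-371 | packages/blackduck-game/blackduck_game-0.2.2-py3-none-any.whl/blackduck/game.py | handle_aces
-- ===== SOURCE A (Python) =====
-- def handle_aces(hand):
--     """
--     Handle Aces in a hand by converting them from 11 to 1 if the total is over 21.
--     Returns the updated total.
--     """
--     total = sum(hand.values())
--     # Keep converting Aces from 11 to 1 until we're under 22 or no more 11-value Aces
--     while total > 21:
--         ace_found = False
--         for card_name in hand:
--             if "A" in card_name and hand[card_name] == 11:
--                 hand[card_name] = 1  # Change Ace from 11 to 1
--                 total = sum(hand.values())  # Recalculate total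
--                 ace_found = True
--                 break  # Only change one Ace at a time
--         if not ace_found:  # No more Aces to convert
--             break
--     return total
-- ===== SOURCE B (Python) =====
-- def handle_aces(hand):
--     """
--     Handle Aces in a hand by converting them from 11 to 1 if the total is over 21.
--     Returns the updated total.
--     """
--     total = sum(hand.values())
--     for card_name in hand:
--         if total <= 21:
--             break
--         if "A" in card_name and hand[card_name] == 11:
--             hand[card_name] = 1
--             total -= 10
--     return total
-- ===== Notes on version B (the rewrite author's own statement) =====
-- stated objective: simpler
-- what changed: Replaces A's nested while/for with repeated restarting scans and full re-summing by a single incremental pass over the keys that subtracts 10 per converted ace and stops once the total is at most 21.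
import Mathlib
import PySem

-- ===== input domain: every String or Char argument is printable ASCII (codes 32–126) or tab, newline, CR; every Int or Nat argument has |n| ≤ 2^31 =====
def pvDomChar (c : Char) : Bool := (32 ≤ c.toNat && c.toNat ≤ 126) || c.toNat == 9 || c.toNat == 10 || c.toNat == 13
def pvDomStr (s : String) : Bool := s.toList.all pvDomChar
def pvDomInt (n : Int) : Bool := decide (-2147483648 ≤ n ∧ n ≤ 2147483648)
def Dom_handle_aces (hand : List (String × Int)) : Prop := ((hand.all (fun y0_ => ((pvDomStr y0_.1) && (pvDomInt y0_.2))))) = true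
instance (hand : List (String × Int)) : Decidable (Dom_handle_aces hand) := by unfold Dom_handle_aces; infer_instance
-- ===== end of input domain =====

-- B replaces A's nested while/for (restarting the key scan and re-summing all values after
-- each conversion) by one incremental pass over the keys: subtract 10 per converted ace and
-- stop once the total is at most 21.  Objective: simpler.  Both versions mutate the dict
-- identically (the same aces are set to 1); the theorems are about the return value.

-- the condition '"A" in card_name and hand[card_name] == 11' (identical in A and B)
def pvHit (d : PySem.Dict String Int) (k : String) : Bool :=
  PySem.Str.isIn "A" k && (d.getD k 0 == 11)

-- ===== PORT A =====
-- A's inner 'for card_name in hand: if …: hand[card_name] = 1; …; break'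
def pvAScan (d : PySem.Dict String Int) : List String → Option String
  | [] => none
  | k :: ks => if pvHit d k then some k else pvAScan d ks

-- A's 'while total > 21' loop; fuel = number of keys bounds the number of conversions
def pvALoop (fuel : Nat) (d : PySem.Dict String Int) : Int :=
  match fuel with
  | 0 => d.values.sum
  | fuel + 1 =>
    let total := d.values.sum
    if total > 21 then
      match pvAScan d d.keys with
      | some k => pvALoop fuel (d.insert k 1)
      | none => total
    else total

def handle_aces (hand : List (String × Int)) : Int :=
  let d := PySem.Dict.ofList hand
  pvALoop d.size d

-- ===== PORT B =====
-- B's single 'for card_name in hand' pass carrying the running total ('break' = stop early)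
def pvBLoop (d : PySem.Dict String Int) (total : Int) : List String → Int
  | [] => total
  | k :: ks =>
    if total ≤ 21 then total
    else if pvHit d k then pvBLoop (d.insert k 1) (total - 10) ks
    else pvBLoop d total ks

def handle_aces_alt (hand : List (String × Int)) : Int :=
  let d := PySem.Dict.ofList hand
  pvBLoop d d.values.sum d.keys

-- ===== PRECONDITION & SPEC =====
def Spec_handle_aces (hand : List (String × Int)) (out : Int) : Prop := out = handle_aces_alt hand
instance (hand : List (String × Int)) (out : Int) : Decidable (Spec_handle_aces hand out) := by unfold Spec_handle_aces; infer_instance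

-- ===== CLAIM (what is proved, stated in full; the proofs are below) =====
def Claim_equal_handle_aces : Prop := ∀ (hand : List (String × Int)), Dom_handle_aces hand → Spec_handle_aces hand (handle_aces hand)

-- ===== LEMMAS AND PROOFS =====

lemma pvAScan_none (d : PySem.Dict String Int) (ks : List String)
    (h : ∀ k ∈ ks, pvHit d k = false) : pvAScan d ks = none := by
  induction ks with
  | nil => rfl
  | cons k ks ih =>
    simp only [pvAScan, h k (by simp), Bool.false_eq_true, if_false]
    exact ih fun x hx => h x (by simp [hx])

lemma pvAScan_first (d : PySem.Dict String Int) (p : List String) (n : String)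
    (rest : List String) (hp : ∀ k ∈ p, pvHit d k = false) (hn : pvHit d n = true) :
    pvAScan d (p ++ n :: rest) = some n := by
  induction p with
  | nil => simp [pvAScan, hn]
  | cons k p ih =>
    simp only [List.cons_append, pvAScan, hp k (by simp), Bool.false_eq_true, if_false]
    exact ih fun x hx => hp x (by simp [hx])

lemma pvSum_map_if (l : List String) (k : String) (f : String → Int)
    (hnd : l.Nodup) (hk : k ∈ l) :
    (l.map (fun j => if j = k then (1 : Int) else f j)).sum = (l.map f).sum - f k + 1 := by
  induction l with
  | nil => cases hk
  | cons x xs ih =>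
    by_cases hxk : x = k
    · subst hxk
      have hnx : x ∉ xs := (List.nodup_cons.mp hnd).1
      have heq : xs.map (fun j => if j = x then (1 : Int) else f j) = xs.map f :=
        List.map_congr_left fun j hj => if_neg (by rintro rfl; exact hnx hj)
      simp [heq]; ring
    · have h : k ∈ xs := by
        rcases List.mem_cons.mp hk with h | h
        · exact absurd h.symm hxk
        · exact h
      simp only [List.map_cons, List.sum_cons, if_neg hxk,
        ih (List.nodup_cons.mp hnd).2 h]
      ring

-- replacing the value 11 at a present key by 1 lowers the sum of the values by 10
lemma pvSum_insert (d : PySem.Dict String Int) (k : String)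
    (hnd : d.keys.Nodup) (hk : k ∈ d.keys) (hv : d.getD k 0 = 11) :
    (d.insert k 1).values.sum = d.values.sum - 10 := by
  have hc : d.contains k = true := (PySem.Dict.contains_iff_mem_keys d k).mpr hk
  have hkeys : (d.insert k 1).keys = d.keys := PySem.Dict.keys_insert_of_contains d 1 hc
  rw [PySem.Dict.values_eq_map_keys d hnd 0,
      PySem.Dict.values_eq_map_keys (d.insert k 1) (hkeys ▸ hnd) 0, hkeys]
  have : d.keys.map (fun j => (d.insert k 1).getD j 0)
       = d.keys.map (fun j => if j = k then (1 : Int) else d.getD j 0) :=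
    List.map_congr_left fun j _ => PySem.Dict.getD_insert d k j 1 0
  rw [this, pvSum_map_if d.keys k (fun j => d.getD j 0) hnd hk, hv]
  ring

-- the invariant: A's restarting loop and B's one pass agree once the keys in p can no longer match
lemma pvMain (r p : List String) (d : PySem.Dict String Int) (fuel : Nat)
    (hk : d.keys = p ++ r) (hnd : d.keys.Nodup)
    (hp : ∀ k ∈ p, pvHit d k = false) (hf : r.length ≤ fuel) :
    pvALoop fuel d = pvBLoop d d.values.sum r := by
  induction r generalizing p d fuel with
  | nil =>
    cases fuel with
    | zero => simp [pvALoop, pvBLoop]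
    | succ f =>
      simp only [pvALoop, pvBLoop]
      split
      · rw [pvAScan_none d d.keys (by rw [hk]; simpa using hp)]
      · rfl
  | cons n rest ih =>
    cases fuel with
    | zero => simp at hf
    | succ f =>
      by_cases htot : d.values.sum > 21
      · by_cases hhit : pvHit d n = true
        · have hscan : pvAScan d d.keys = some n := by
            rw [hk]; exact pvAScan_first d p n rest hp hhit
          have hmem : n ∈ d.keys := by rw [hk]; simp
          have hv : d.getD n 0 = 11 := by
            have := hhit; simp only [pvHit, Bool.and_eq_true, beq_iff_eq] at this
            exact this.2
          have hc : d.contains n = true := (PySem.Dict.contains_iff_mem_keys d n).mpr hmem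
          have hkeys' : (d.insert n 1).keys = d.keys :=
            PySem.Dict.keys_insert_of_contains d 1 hc
          have hsum := pvSum_insert d n hnd hmem hv
          have hstep : pvALoop (f + 1) d = pvALoop f (d.insert n 1) := by
            simp [pvALoop, htot, hscan]
          rw [hstep,
            ih (p ++ [n]) (d.insert n 1) f
              (by rw [hkeys', hk]; simp)
              (by rw [hkeys']; exact hnd)
              (by
                intro k hkp
                rcases List.mem_append.mp hkp with h | h
                · have hkn : k ≠ n := by
                    rw [hk] at hnd
                    exact (List.nodup_append.mp hnd).2.2 k h n (by simp)
                  have hpk := hp k h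
                  simp only [pvHit] at hpk ⊢
                  rw [PySem.Dict.getD_insert_of_ne d 1 0 hkn]
                  exact hpk
                · simp only [List.mem_singleton] at h; subst h
                  simp [pvHit, PySem.Dict.getD_insert_self])
              (by simp at hf ⊢; omega), hsum]
          simp [pvBLoop, hhit, if_neg (by omega : ¬ d.values.sum ≤ 21)]
        · have hrest : pvALoop (f + 1) d = pvBLoop d d.values.sum rest :=
            ih (p ++ [n]) d (f + 1)
              (by rw [hk]; simp) hnd
              (by
                intro k hkp
                rcases List.mem_append.mp hkp with h | h
                · exact hp k h
                · simp only [List.mem_singleton] at h; subst h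
                  simp only [Bool.not_eq_true] at hhit
                  exact hhit)
              (by simp at hf ⊢; omega)
          rw [hrest]
          simp [pvBLoop, hhit, if_neg (by omega : ¬ d.values.sum ≤ 21)]
      · simp [pvALoop, pvBLoop, htot, (by omega : d.values.sum ≤ 21)]

-- ===== VERDICT (by name: the statement is the Claim_ definition above) =====
theorem handle_aces_spec : Claim_equal_handle_aces := by
  intro hand _
  unfold Spec_handle_aces handle_aces handle_aces_alt
  exact pvMain (PySem.Dict.ofList hand).keys [] (PySem.Dict.ofList hand) _
    rfl (PySem.Dict.nodup_keys_ofList hand) (by simp) (le_of_eq (by simp [PySem.Dict.keys, PySem.Dict.size]))
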